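-- pv_equiv track=rewrite | github.com/wymm045/race-candidates-app | collector.py | ensure_base_triplets_present
-- ===== SOURCE A (Python) =====
-- def ensure_base_triplets_present(top, scored_rows, base_triplets, min_keep=1):
--     if not top or not base_triplets or min_keep <= 0:
--         return top
--
--     selected = top[:]
--     existing = [tri for tri in selected if tri in base_triplets]
--     if len(existing) >= min_keep:
--         return selected
--
--     needed = min_keep - len(existing)
--     candidate_base = []
--     score_map = {tri: score for tri, score in scored_rows}
--     for tri in base_triplets:
--         if tri not in selected and tri in score_map:
--             candidate_base.append((tri, score_map[tri]))
--     candidate_base.sort(key=lambda x: (x[1], x[0]), reverse=True)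
--
--     for tri, _score in candidate_base[:needed]:
--         replace_idx = None
--         for idx in range(len(selected) - 1, -1, -1):
--             if selected[idx] not in base_triplets:
--                 replace_idx = idx
--                 break
--         if replace_idx is None:
--             break
--         selected[replace_idx] = tri
--
--     dedup = []
--     for tri in selected:
--         if tri not in dedup:
--             dedup.append(tri)
--         if len(dedup) >= 6:
--             break
--     return dedup
-- ===== SOURCE B (Python) =====
-- def ensure_base_triplets_present(top, scored_rows, base_triplets, min_keep=1):
--     if not top or not base_triplets or min_keep <= 0:
--         return top
--     selected = list(top)
--     existing = sum(1 for t in selected if t in base_triplets)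
--     if existing >= min_keep:
--         return selected
--     needed = min_keep - existing
--     score_map = dict(scored_rows)
--     candidate_base = sorted(
--         ((tri, score_map[tri]) for tri in base_triplets
--          if tri not in selected and tri in score_map),
--         key=lambda x: (x[1], x[0]), reverse=True)
--     replace_indices = [i for i in reversed(range(len(selected)))
--                        if selected[i] not in base_triplets]
--     for (tri, _), i in zip(candidate_base[:needed], replace_indices):
--         selected[i] = tri
--     return list(dict.fromkeys(selected))[:6]
-- ===== Notes on version B (the rewrite author's own statement) =====
-- stated objective: alternative
-- what changed: The replacement phase no longer re-scans selected backwards for each candidate: the list of replaceable positions is built once and candidates are zipped onto it; the existing-base check becomes a count instead of a collected list, and the capped dedup loop becomes dict.fromkeys plus a [:6] slice.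
import Mathlib
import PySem

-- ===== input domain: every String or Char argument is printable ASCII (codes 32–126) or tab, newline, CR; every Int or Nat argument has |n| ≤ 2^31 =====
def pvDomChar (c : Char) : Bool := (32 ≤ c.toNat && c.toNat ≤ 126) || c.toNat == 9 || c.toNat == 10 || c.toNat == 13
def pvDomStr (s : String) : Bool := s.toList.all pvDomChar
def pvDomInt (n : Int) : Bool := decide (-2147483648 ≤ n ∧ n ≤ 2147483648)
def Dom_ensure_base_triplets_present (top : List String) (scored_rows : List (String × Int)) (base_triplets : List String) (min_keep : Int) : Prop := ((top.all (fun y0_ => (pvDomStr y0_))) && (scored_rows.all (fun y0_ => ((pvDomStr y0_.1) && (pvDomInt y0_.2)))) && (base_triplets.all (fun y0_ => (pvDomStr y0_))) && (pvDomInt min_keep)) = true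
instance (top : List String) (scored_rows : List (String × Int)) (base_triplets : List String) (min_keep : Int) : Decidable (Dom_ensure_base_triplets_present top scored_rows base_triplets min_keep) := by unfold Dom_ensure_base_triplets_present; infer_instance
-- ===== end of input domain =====

-- B replaces A's per-candidate backward scan by a reverse index list built once and consumed by zip,
-- counts instead of collecting the existing base entries, and writes the capped dedup as dict.fromkeys + [:6]
-- (objective: alternative decomposition, same cost at these sizes).

-- ===== PORT A =====
-- inner backward scan: `for idx in range(len(selected)-1,-1,-1): if selected[idx] not in base: …break`
-- (`selected.getD idx ""` is exact here: idx ranges over valid indices of selected)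
def pvScanBack (base sel : List String) : Option Nat :=
  ((List.range sel.length).reverse).find? (fun i => !(base.contains (sel.getD i "")))

-- the replacement loop of A, with its early `break` when no replaceable slot remains
def pvReplLoopA (base : List String) : List (String × Int) → List String → List String
  | [], sel => sel
  | (tri, _) :: rest, sel =>
    match pvScanBack base sel with
    | none => sel
    | some idx => pvReplLoopA base rest (sel.set idx tri)

-- the dedup loop of A, with its cap-at-6 `break`
def pvDedupCap : List String → List String → List String
  | [], acc => acc
  | tri :: rest, acc =>
    let acc' := if acc.contains tri then acc else acc ++ [tri]
    if 6 ≤ acc'.length then acc' else pvDedupCap rest acc'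

def ensure_base_triplets_present (top : List String) (scored_rows : List (String × Int)) (base_triplets : List String) (min_keep : Int) : List String :=
  if top = [] ∨ base_triplets = [] ∨ min_keep ≤ 0 then top
  else
    let selected := top
    let existing := selected.filter (fun t => base_triplets.contains t)
    if min_keep ≤ (existing.length : Int) then selected
    else
      let needed : Int := min_keep - existing.length
      let score_map := scored_rows.foldl (fun d p => d.insert p.1 p.2) PySem.Dict.empty
      let candidate_base := base_triplets.foldl (fun acc tri =>
        if !(selected.contains tri) && score_map.contains tri then
          acc ++ [(tri, score_map.getD tri 0)]   -- getD guarded by `contains`: no KeyError possible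
        else acc) []
      let sorted_cb := PySem.List.sorted2 candidate_base (fun x => x.2) (fun x => x.1) true
      let sel2 := pvReplLoopA base_triplets (PySem.List.slice sorted_cb none (some needed)) selected
      pvDedupCap sel2 []

-- ===== PORT B =====
-- `[i for i in reversed(range(len(selected))) if selected[i] not in base_triplets]`
def pvNonBase (base sel : List String) : List Nat :=
  ((List.range sel.length).reverse).filter (fun i => !(base.contains (sel.getD i "")))

def ensure_base_triplets_present_alt (top : List String) (scored_rows : List (String × Int)) (base_triplets : List String) (min_keep : Int) : List String :=
  if top = [] ∨ base_triplets = [] ∨ min_keep ≤ 0 then top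
  else
    let selected := top
    let existing : Int := selected.countP (fun t => base_triplets.contains t)
    if min_keep ≤ existing then selected
    else
      let needed : Int := min_keep - existing
      let score_map := PySem.Dict.ofList scored_rows
      let candidate_base := PySem.List.sorted2
        (base_triplets.filterMap (fun tri =>
          if !(selected.contains tri) then (score_map.get? tri).map (fun s => (tri, s)) else none))
        (fun x => x.2) (fun x => x.1) true
      let sel2 := ((PySem.List.slice candidate_base none (some needed)).zip (pvNonBase base_triplets selected)).foldl
        (fun s p => s.set p.2 p.1.1) selected
      PySem.List.slice (PySem.List.dedup sel2) none (some 6)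

-- ===== PRECONDITION & SPEC =====
def Spec_ensure_base_triplets_present (top : List String) (scored_rows : List (String × Int)) (base_triplets : List String) (min_keep : Int) (out : List String) : Prop := out = ensure_base_triplets_present_alt top scored_rows base_triplets min_keep
instance (top : List String) (scored_rows : List (String × Int)) (base_triplets : List String) (min_keep : Int) (out : List String) : Decidable (Spec_ensure_base_triplets_present top scored_rows base_triplets min_keep out) := by unfold Spec_ensure_base_triplets_present; infer_instance

-- ===== CLAIM (what is proved, stated in full; the proofs are below) =====
def Claim_equal_ensure_base_triplets_present : Prop := ∀ (top : List String) (scored_rows : List (String × Int)) (base_triplets : List String) (min_keep : Int), Dom_ensure_base_triplets_present top scored_rows base_triplets min_keep → Spec_ensure_base_triplets_present top scored_rows base_triplets min_keep (ensure_base_triplets_present top scored_rows base_triplets min_keep)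

-- ===== LEMMAS AND PROOFS =====

-- A's append-if loop over base_triplets builds exactly B's filterMap comprehension
lemma pv_cand_eq (sel : List String) (d : PySem.Dict String Int) :
    ∀ (l : List String) (acc : List (String × Int)),
      l.foldl (fun acc tri =>
        if !(sel.contains tri) && d.contains tri then acc ++ [(tri, d.getD tri 0)] else acc) acc
      = acc ++ l.filterMap (fun tri =>
          if !(sel.contains tri) then (d.get? tri).map (fun s => (tri, s)) else none) := by
  intro l
  induction l with
  | nil => intro acc; simp
  | cons tri rest ih =>
    intro acc
    simp only [List.foldl_cons, List.filterMap_cons]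
    rw [PySem.Dict.contains_eq_isSome_get?]
    cases hsel : sel.contains tri with
    | true =>
      simp only [Bool.not_true, Bool.false_and]
      exact ih acc
    | false =>
      cases hg : d.get? tri with
      | none =>
        simp only [Bool.not_false, Option.isSome_none, Bool.and_false, Option.map_none]
        exact ih acc
      | some s =>
        have hgd : d.getD tri 0 = s := by rw [PySem.Dict.getD_eq_get?_getD, hg]; rfl
        simp only [Bool.not_false, Option.isSome_some, Bool.and_true, Option.map_some]
        rw [hgd, ih]; simp

-- generic: removing the head of a filter over a nodup list by flipping the predicate at that element
lemma pv_filter_flip_head {L : List Nat} {p q : Nat → Bool} {i : Nat} {is : List Nat}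
    (hnd : L.Nodup) (hq : ∀ j ∈ L, j ≠ i → q j = p j) (hqi : q i = false)
    (hp : L.filter p = i :: is) : L.filter q = is := by
  induction L with
  | nil => simp at hp
  | cons a L' ih =>
    obtain ⟨hna, hnd'⟩ := List.nodup_cons.mp hnd
    by_cases hpa : p a = true
    · rw [List.filter_cons_of_pos hpa] at hp
      obtain ⟨rfl, hrest⟩ := List.cons_eq_cons.mp hp
      rw [List.filter_cons_of_neg (by simp [hqi])]
      rw [← hrest]
      apply List.filter_congr
      intro j hj
      exact hq j (List.mem_cons_of_mem _ hj) (fun h => hna (h ▸ hj))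
    · rw [List.filter_cons_of_neg (by simpa using hpa)] at hp
      have hia : i ≠ a := by
        intro h
        have : i ∈ L'.filter p := hp ▸ List.mem_cons_self
        exact hna (h ▸ (List.mem_filter.mp this).1)
      have hqa : q a = false := by
        rw [hq a List.mem_cons_self (fun h => hia h.symm)]
        simpa using hpa
      rw [List.filter_cons_of_neg (by simp [hqa])]
      exact ih hnd' (fun j hj hji => hq j (List.mem_cons_of_mem _ hj) hji) hp

lemma pv_nonBase_set {base sel : List String} {tri : String} {i : Nat} {is : List Nat}
    (htri : base.contains tri = true) (h : pvNonBase base sel = i :: is) :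
    pvNonBase base (sel.set i tri) = is := by
  have hnd : ((List.range sel.length).reverse).Nodup := List.nodup_reverse.mpr List.nodup_range
  have hi_mem : i ∈ (List.range sel.length).reverse := by
    have : i ∈ pvNonBase base sel := h ▸ List.mem_cons_self
    exact (List.mem_filter.mp this).1
  have hilt : i < sel.length := by
    simpa using (List.mem_range.mp (List.mem_reverse.mp hi_mem))
  unfold pvNonBase
  rw [List.length_set]
  apply pv_filter_flip_head hnd _ _ h
  · intro j hj hji
    have hji' : (sel.set i tri).getD j "" = sel.getD j "" := by
      simp [List.getD, List.getElem?_set_ne (fun h => hji h.symm)]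
    simp only [hji']
  · have hset : (sel.set i tri).getD i "" = tri := by
      simp [List.getD, hilt]
    simp only [hset, htri, Bool.not_true]

lemma pv_scanBack_eq_head (base sel : List String) :
    pvScanBack base sel = (pvNonBase base sel).head? := by
  unfold pvScanBack pvNonBase
  exact List.head?_filter.symm

-- A's replacement loop with its repeated backward scan IS B's fold over the zip with the prebuilt index list
lemma pv_repl_eq (base : List String) :
    ∀ (cands : List (String × Int)) (sel : List String),
      (∀ p ∈ cands, base.contains p.1 = true) →
      pvReplLoopA base cands sel
        = (cands.zip (pvNonBase base sel)).foldl (fun s p => s.set p.2 p.1.1) sel := by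
  intro cands
  induction cands with
  | nil => intro sel _; simp [pvReplLoopA]
  | cons c rest ih =>
    intro sel hb
    obtain ⟨tri, sc⟩ := c
    rw [pvReplLoopA]
    rw [pv_scanBack_eq_head]
    cases h : pvNonBase base sel with
    | nil => simp
    | cons i is =>
      simp only [List.head?_cons, List.zip_cons_cons, List.foldl_cons]
      have htri : base.contains tri = true := hb (tri, sc) List.mem_cons_self
      rw [ih (sel.set i tri) (fun p hp => hb p (List.mem_cons_of_mem _ hp)),
          pv_nonBase_set htri h]

lemma pv_dedup_prefix :
    ∀ (xs acc : List String),
      acc <+: xs.foldl (fun acc x => if acc.contains x then acc else acc ++ [x]) acc := by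
  intro xs
  induction xs with
  | nil => intro acc; simp
  | cons y ys ihy =>
    intro acc
    simp only [List.foldl_cons]
    refine List.IsPrefix.trans ?_ (ihy _)
    split <;> simp

-- A's capped dedup loop is dedup-then-take-6
lemma pv_dedupCap_eq :
    ∀ (xs acc : List String), acc.length < 6 →
      pvDedupCap xs acc
        = (xs.foldl (fun acc x => if acc.contains x then acc else acc ++ [x]) acc).take 6 := by
  intro xs
  induction xs with
  | nil =>
    intro acc h
    simp [pvDedupCap, List.take_of_length_le (Nat.le_of_lt h)]
  | cons tri rest ih =>
    intro acc h
    rw [pvDedupCap]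
    set acc' := if acc.contains tri then acc else acc ++ [tri] with hacc'
    have hlen : acc'.length ≤ acc.length + 1 := by
      rw [hacc']; split <;> simp
    simp only [List.foldl_cons, ← hacc']
    by_cases h6 : 6 ≤ acc'.length
    · have hlen6 : acc'.length = 6 := le_antisymm (by omega) h6
      rw [if_pos h6]
      have hpre := pv_dedup_prefix rest acc'
      obtain ⟨t, ht⟩ := hpre
      rw [← ht, List.take_append_of_le_length (by omega), List.take_of_length_le (by omega)]
    · rw [if_neg h6]
      exact ih acc' (by omega)

-- ===== VERDICT (by name: the statement is the Claim_ definition above) =====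
theorem ensure_base_triplets_present_spec : Claim_equal_ensure_base_triplets_present := by
  intro top scored_rows base_triplets min_keep _
  unfold Spec_ensure_base_triplets_present ensure_base_triplets_present ensure_base_triplets_present_alt
  by_cases hg : top = [] ∨ base_triplets = [] ∨ min_keep ≤ 0
  · simp [hg]
  · rw [if_neg hg, if_neg hg]
    simp only []
    have hcount : (top.countP (fun t => base_triplets.contains t) : Int)
        = ((top.filter (fun t => base_triplets.contains t)).length : Int) := by
      rw [List.countP_eq_length_filter]
    rw [← hcount]
    by_cases hk : min_keep ≤ (top.countP (fun t => base_triplets.contains t) : Int)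
    · rw [if_pos hk, if_pos hk]
    · rw [if_neg hk, if_neg hk]
      have hmap : scored_rows.foldl (fun d p => d.insert p.1 p.2) PySem.Dict.empty
          = PySem.Dict.ofList scored_rows := rfl
      rw [hmap, pv_cand_eq]
      simp only [List.nil_append]
      set cb := PySem.List.sorted2
        (base_triplets.filterMap (fun tri =>
          if !(top.contains tri) then ((PySem.Dict.ofList scored_rows).get? tri).map (fun s => (tri, s)) else none))
        (fun x => x.2) (fun x => x.1) true with hcb
      rw [pv_repl_eq]
      · have h6 : ∀ (l : List String), PySem.List.slice l none (some 6) = l.take 6 :=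
          fun l => PySem.List.slice_to l (by norm_num)
        rw [pv_dedupCap_eq _ [] (by simp), h6]
        rfl
      · intro p hp
        have h1 : p ∈ cb := PySem.List.mem_of_mem_slice _ none _ hp
        have h2 : p ∈ base_triplets.filterMap (fun tri =>
            if !(top.contains tri) then ((PySem.Dict.ofList scored_rows).get? tri).map (fun s => (tri, s)) else none) := by
          have hperm := PySem.List.sorted2_perm
            (base_triplets.filterMap (fun tri =>
              if !(top.contains tri) then ((PySem.Dict.ofList scored_rows).get? tri).map (fun s => (tri, s)) else none))
            (fun x => x.2) (fun x => x.1) true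
          exact hperm.mem_iff.mp (hcb ▸ h1)
        obtain ⟨tri, htri, hval⟩ := List.mem_filterMap.mp h2
        have hp1 : p.1 = tri := by
          cases hcond : (!top.contains tri) with
          | false => rw [hcond] at hval; simp at hval
          | true =>
            rw [hcond] at hval
            simp at hval
            obtain ⟨s, _, hps⟩ := hval
            rw [← hps]
        rw [hp1]
        exact List.contains_iff_mem.mpr htri
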